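-- pv_equiv track=rewrite | github.com/SauravSinha76/scaler | class46/flip_n_find_next.py | solve
-- ===== SOURCE A (Python) =====
-- def ceiling(A,low,high,idx):
--     while low <= high:
--         mid = (low + high) // 2
--         if A[mid] == idx:
--             return mid
--         elif A[mid] < idx:
--             low = mid + 1
--         else:
--             high = mid -1
--     return low
--
-- def solve(A,B):
--     n = len(A)
--     index = []
--     ans =[]
--     for i in range(len(A)):
--         if A[i] == '1':
--             index.append(i+1)
--     for b in B:
--         op = b[0]
--         idx = b[1]
--
--         if op == 1:
--             if idx in index:
--                 index.remove(idx)
--             else: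
--                 index.append(idx)
--         else:
--             index.sort()
--             left = ceiling(index,0,len(index)-1,idx)
--             right = left -1
--             if left >= len(index) and right < 0:
--                 ans.append(-1)
--             elif left < len(index) and right < 0:
--                 ans.append(index[left])
--             elif left >= len(index) and right > -1:
--                 ans.append(index[right])
--             else:
--                 if index[left] - idx < idx - index[right]:
--                     ans.append(index[left])
--                 else:
--                     ans.append(index[right])
--
--     return ans
-- ===== SOURCE B (Python) =====
-- def _bisect_left(s, x):
--     lo, hi = 0, len(s)
--     while lo < hi:
--         mid = (lo + hi) // 2
--         if s[mid] < x:
--             lo = mid + 1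
--         else:
--             hi = mid
--     return lo
--
-- def solve(A, B):
--     # one sorted list maintained incrementally; no per-query re-sort
--     s = [i + 1 for i, c in enumerate(A) if c == '1']
--     ans = []
--     for b in B:
--         op = b[0]
--         idx = b[1]
--         pos = _bisect_left(s, idx)
--         if op == 1:
--             if pos < len(s) and s[pos] == idx:
--                 del s[pos]
--             else:
--                 s.insert(pos, idx)
--         else:
--             if not s:
--                 ans.append(-1)
--             elif pos == len(s):
--                 ans.append(s[-1])
--             elif pos == 0:
--                 ans.append(s[0])
--             elif s[pos] - idx < idx - s[pos - 1]:
--                 ans.append(s[pos])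
--             else:
--                 ans.append(s[pos - 1])
--     return ans
-- ===== Notes on version B (the rewrite author's own statement) =====
-- stated objective: alternative
-- what changed: B keeps the set-bit indices in one incrementally maintained sorted list (binary-search membership, positional insert/delete, binary-search query) instead of A's unsorted list with linear membership/remove plus a full re-sort before every query; measured wall-clock is comparable (Python's C-level sort is fast), so no speed is claimed.
-- outside the precondition, e.g. on solve('1', [[2]]): A raises IndexError, B raises IndexError
import Mathlib
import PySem

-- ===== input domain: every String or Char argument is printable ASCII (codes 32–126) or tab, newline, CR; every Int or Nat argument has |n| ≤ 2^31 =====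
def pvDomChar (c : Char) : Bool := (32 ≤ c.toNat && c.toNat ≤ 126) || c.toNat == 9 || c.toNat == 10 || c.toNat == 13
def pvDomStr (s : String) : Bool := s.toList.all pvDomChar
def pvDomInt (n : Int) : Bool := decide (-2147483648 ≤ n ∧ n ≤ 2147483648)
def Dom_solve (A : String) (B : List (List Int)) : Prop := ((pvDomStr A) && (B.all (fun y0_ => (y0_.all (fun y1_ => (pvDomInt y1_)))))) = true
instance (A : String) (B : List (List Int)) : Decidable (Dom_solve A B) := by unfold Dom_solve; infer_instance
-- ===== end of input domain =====

-- B replaces A's per-query full sort + linear membership/remove by ONE sorted list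
-- maintained incrementally with a hand-written binary search (objective: alternative).
-- ===== PORT A =====
-- Python `ceiling`: every call solve makes keeps 0 ≤ low ≤ mid ≤ high < len(A),
-- so the `.getD 0` default of the in-range index is never read (exact there).
def ceilingFuel (s : List Int) (idx : Int) : Nat → Int → Int → Int
  | 0, low, _ => low
  | fuel + 1, low, high =>
    if low ≤ high then
      let mid := PySem.Int.floordiv (low + high) 2
      let v := (PySem.List.pyGet? s mid).getD 0
      if v = idx then mid
      else if v < idx then ceilingFuel s idx fuel (mid + 1) high
      else ceilingFuel s idx fuel low (mid - 1)
    else low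

-- the interval shrinks at every iteration, so `(high + 1 - low).toNat` fuel is enough
def ceiling (s : List Int) (low high idx : Int) : Int :=
  ceilingFuel s idx (high + 1 - low).toNat low high

-- body of A's `for b in B` loop; `b[0]`/`b[1]` are in range on Pre_ (len b ≥ 2)
def stepA (st : List Int × List Int) (b : List Int) : List Int × List Int :=
  let op := (PySem.List.pyGet? b 0).getD 0
  let idx := (PySem.List.pyGet? b 1).getD 0
  if op = 1 then
    if idx ∈ st.1 then ((PySem.List.remove? st.1 idx).getD st.1, st.2)
    else (st.1 ++ [idx], st.2)
  else
    let ix := PySem.List.sorted st.1 (fun x => x)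
    let len : Int := ix.length
    let left := ceiling ix 0 (len - 1) idx
    let right := left - 1
    if left ≥ len ∧ right < 0 then (ix, st.2 ++ [-1])
    else if left < len ∧ right < 0 then (ix, st.2 ++ [(PySem.List.pyGet? ix left).getD 0])
    else if left ≥ len ∧ right > -1 then (ix, st.2 ++ [(PySem.List.pyGet? ix right).getD 0])
    else if (PySem.List.pyGet? ix left).getD 0 - idx < idx - (PySem.List.pyGet? ix right).getD 0 then
      (ix, st.2 ++ [(PySem.List.pyGet? ix left).getD 0])
    else (ix, st.2 ++ [(PySem.List.pyGet? ix right).getD 0])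

def solve (A : String) (B : List (List Int)) : List Int :=
  let index := (PySem.List.pyRange 0 (PySem.Str.len A)).foldl
    (fun acc i => if (PySem.Str.pyGet? A i).getD ' ' = '1' then acc ++ [i + 1] else acc) []
  (B.foldl stepA (index, [])).2

-- ===== PORT B =====
-- Source B's hand-written `_bisect_left` while-loop (indices stay in [0, len), exact)
def bisectFuel (s : List Int) (x : Int) : Nat → Int → Int → Int
  | 0, lo, _ => lo
  | fuel + 1, lo, hi =>
    if lo < hi then
      let mid := PySem.Int.floordiv (lo + hi) 2
      if (PySem.List.pyGet? s mid).getD 0 < x then bisectFuel s x fuel (mid + 1) hi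
      else bisectFuel s x fuel lo mid
    else lo

-- `(hi - lo).toNat` fuel is enough: the interval shrinks at every iteration
def bisectLeftLoop (s : List Int) (x : Int) (lo hi : Int) : Int :=
  bisectFuel s x (hi - lo).toNat lo hi

-- body of Source B's `for b in B` loop; `del s[pos]` is `pop?` (guard makes it succeed)
def stepB (st : List Int × List Int) (b : List Int) : List Int × List Int :=
  let op := (PySem.List.pyGet? b 0).getD 0
  let idx := (PySem.List.pyGet? b 1).getD 0
  let pos := bisectLeftLoop st.1 idx 0 (st.1.length : Int)
  if op = 1 then
    if pos < (st.1.length : Int) ∧ (PySem.List.pyGet? st.1 pos).getD 0 = idx then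
      (((PySem.List.pop? st.1 pos).getD (0, st.1)).2, st.2)
    else (PySem.List.insert st.1 pos idx, st.2)
  else
    if st.1 = [] then (st.1, st.2 ++ [-1])
    else if pos = (st.1.length : Int) then (st.1, st.2 ++ [(PySem.List.pyGet? st.1 (-1)).getD 0])
    else if pos = 0 then (st.1, st.2 ++ [(PySem.List.pyGet? st.1 0).getD 0])
    else if (PySem.List.pyGet? st.1 pos).getD 0 - idx < idx - (PySem.List.pyGet? st.1 (pos - 1)).getD 0 then
      (st.1, st.2 ++ [(PySem.List.pyGet? st.1 pos).getD 0])
    else (st.1, st.2 ++ [(PySem.List.pyGet? st.1 (pos - 1)).getD 0])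

def solve_alt (A : String) (B : List (List Int)) : List Int :=
  let s := ((PySem.List.enumerate A.toList).filter (fun p => p.2 == '1')).map (fun p => p.1 + 1)
  (B.foldl stepB (s, [])).2

-- ===== PRECONDITION & SPEC =====
-- Pre_ excludes exactly the queries on which A raises IndexError: a query list with
-- fewer than two entries (b[0]/b[1]).
def Pre_solve (A : String) (B : List (List Int)) : Prop := ∀ b ∈ B, 2 ≤ b.length
instance (A : String) (B : List (List Int)) : Decidable (Pre_solve A B) := by unfold Pre_solve; infer_instance
def pvWitness_solve : String × List (List Int) := ("101", [[1, 2], [2, 3], [1, 3], [2, 0]])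
def Spec_solve (A : String) (B : List (List Int)) (out : List Int) : Prop := out = solve_alt A B
instance (A : String) (B : List (List Int)) (out : List Int) : Decidable (Spec_solve A B out) := by unfold Spec_solve; infer_instance

-- ===== CLAIM (what is proved, stated in full; the proofs are below) =====
def Claim_equal_solve : Prop := ∀ (A : String) (B : List (List Int)), Dom_solve A B → Pre_solve A B → Spec_solve A B (solve A B)

-- ===== LEMMAS AND PROOFS =====

def cnt (s : List Int) (x : Int) : Nat := s.countP (fun y => decide (y < x))

lemma cnt_le_length (s : List Int) (x : Int) : cnt s x ≤ s.length := List.countP_le_length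

lemma sorted_getElem_lt_iff (s : List Int) (hs : s.Pairwise (· < ·)) (x : Int) :
    ∀ (j : Nat) (hj : j < s.length), (s[j] < x ↔ j < cnt s x) := by
  induction s with
  | nil => intro j hj; simp at hj
  | cons a t ih =>
    rcases List.pairwise_cons.mp hs with ⟨ha, ht⟩
    intro j hj
    by_cases hax : a < x
    · cases j with
      | zero => simpa [cnt, List.countP_cons, hax]
      | succ k =>
        have h2 := ih ht k (by simpa using hj)
        have hc : cnt (a :: t) x = cnt t x + 1 := by
          simp [cnt, List.countP_cons, hax]
        rw [List.getElem_cons_succ, hc]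
        exact ⟨fun h => Nat.succ_lt_succ (h2.mp h), fun h => h2.mpr (Nat.lt_of_succ_lt_succ h)⟩
    · have hz : cnt (a :: t) x = 0 := by
        simp only [cnt, List.countP_eq_zero]
        intro y hy
        rcases List.mem_cons.mp hy with rfl | hyt
        · simpa using hax
        · simp only [decide_eq_true_eq]
          exact fun hlt => hax (lt_trans (ha y hyt) hlt)
      rw [hz]
      cases j with
      | zero => simpa using hax
      | succ k =>
        simp only [List.getElem_cons_succ]
        constructor
        · intro hlt
          exact absurd (lt_trans (ha _ (List.getElem_mem _)) hlt) hax
        · omega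

lemma ceilingFuel_eq (s : List Int) (hs : s.Pairwise (· < ·)) (x : Int) :
    ∀ (N : Nat) (low high : Int), (high + 1 - low).toNat ≤ N → 0 ≤ low →
      high < (s.length : Int) → low ≤ (cnt s x : Int) → (cnt s x : Int) ≤ high + 1 →
      ceilingFuel s x N low high = (cnt s x : Int) := by
  intro N
  induction N with
  | zero =>
    intro low high hN h0 hlen hlo hhi
    show low = (cnt s x : Int)
    omega
  | succ n ih =>
    intro low high hN h0 hlen hlo hhi
    by_cases h : low ≤ high
    · show (if low ≤ high then
          if (PySem.List.pyGet? s (PySem.Int.floordiv (low + high) 2)).getD 0 = x then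
            PySem.Int.floordiv (low + high) 2
          else if (PySem.List.pyGet? s (PySem.Int.floordiv (low + high) 2)).getD 0 < x then
            ceilingFuel s x n (PySem.Int.floordiv (low + high) 2 + 1) high
          else ceilingFuel s x n low (PySem.Int.floordiv (low + high) 2 - 1)
        else low) = (cnt s x : Int)
      rw [if_pos h]
      have hmid := PySem.Int.floordiv_two_mid_bounds h
      have hmlt : PySem.Int.floordiv (low + high) 2 < (s.length : Int) := by omega
      have hm0 : 0 ≤ PySem.Int.floordiv (low + high) 2 := by omega
      set mid := PySem.Int.floordiv (low + high) 2 with hm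
      have hjlt : mid.toNat < s.length := by omega
      have hv : (PySem.List.pyGet? s mid).getD 0 = s[mid.toNat] := by
        rw [PySem.List.pyGet?_eq_some_getElem s hm0 hmlt]; rfl
      have hiff := sorted_getElem_lt_iff s hs x mid.toNat hjlt
      rw [hv]
      by_cases he : s[mid.toNat] = x
      · rw [if_pos he]
        have h1 : cnt s x ≤ mid.toNat := by
          by_contra hc; push Not at hc
          exact absurd (hiff.mpr hc) (by rw [he]; exact lt_irrefl x)
        have h2 : mid.toNat ≤ cnt s x := by
          rcases Nat.eq_zero_or_pos mid.toNat with h0' | hpos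
          · omega
          · have hlt : s[mid.toNat - 1] < x := by
              have := (List.pairwise_iff_getElem.mp hs) (mid.toNat - 1) mid.toNat
                (by omega) hjlt (by omega)
              omega
            have := (sorted_getElem_lt_iff s hs x (mid.toNat - 1) (by omega)).mp hlt
            omega
        omega
      · rw [if_neg he]
        by_cases hlt : s[mid.toNat] < x
        · rw [if_pos hlt]
          have := hiff.mp hlt
          exact ih (mid + 1) high (by omega) (by omega) hlen (by omega) hhi
        · rw [if_neg hlt]
          have : cnt s x ≤ mid.toNat := by
            by_contra hc; push Not at hc; exact hlt (hiff.mpr hc)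
          exact ih low (mid - 1) (by omega) h0 (by omega) hlo (by omega)
    · show (if low ≤ high then _ else low) = (cnt s x : Int)
      rw [if_neg h]
      omega

lemma ceiling_eq (s : List Int) (hs : s.Pairwise (· < ·)) (x : Int)
    (low high : Int) (h0 : 0 ≤ low) (hlen : high < (s.length : Int))
    (hlo : low ≤ (cnt s x : Int)) (hhi : (cnt s x : Int) ≤ high + 1) :
    ceiling s low high x = (cnt s x : Int) :=
  ceilingFuel_eq s hs x (high + 1 - low).toNat low high le_rfl h0 hlen hlo hhi

lemma bisectFuel_eq (s : List Int) (hs : s.Pairwise (· < ·)) (x : Int) :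
    ∀ (N : Nat) (lo hi : Int), (hi - lo).toNat ≤ N → 0 ≤ lo →
      hi ≤ (s.length : Int) → lo ≤ (cnt s x : Int) → (cnt s x : Int) ≤ hi →
      bisectFuel s x N lo hi = (cnt s x : Int) := by
  intro N
  induction N with
  | zero =>
    intro lo hi hN h0 hlen hlo hhi
    show lo = (cnt s x : Int)
    omega
  | succ n ih =>
    intro lo hi hN h0 hlen hlo hhi
    by_cases h : lo < hi
    · show (if lo < hi then
          if (PySem.List.pyGet? s (PySem.Int.floordiv (lo + hi) 2)).getD 0 < x then
            bisectFuel s x n (PySem.Int.floordiv (lo + hi) 2 + 1) hi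
          else bisectFuel s x n lo (PySem.Int.floordiv (lo + hi) 2)
        else lo) = (cnt s x : Int)
      rw [if_pos h]
      have hmid := PySem.Int.floordiv_two_mid_bounds (le_of_lt h)
      have hmhi : PySem.Int.floordiv (lo + hi) 2 < hi := by
        rw [PySem.Int.floordiv_lt_iff_lt_mul (by omega)]; omega
      have hm0 : 0 ≤ PySem.Int.floordiv (lo + hi) 2 := by omega
      set mid := PySem.Int.floordiv (lo + hi) 2 with hm
      have hjlt : mid.toNat < s.length := by omega
      have hv : (PySem.List.pyGet? s mid).getD 0 = s[mid.toNat] := by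
        rw [PySem.List.pyGet?_eq_some_getElem s hm0 (by omega)]; rfl
      have hiff := sorted_getElem_lt_iff s hs x mid.toNat hjlt
      rw [hv]
      by_cases hlt : s[mid.toNat] < x
      · rw [if_pos hlt]
        have := hiff.mp hlt
        exact ih (mid + 1) hi (by omega) (by omega) hlen (by omega) hhi
      · rw [if_neg hlt]
        have : cnt s x ≤ mid.toNat := by
          by_contra hc; push Not at hc; exact hlt (hiff.mpr hc)
        exact ih lo mid (by omega) h0 (by omega) hlo (by omega)
    · show (if lo < hi then _ else lo) = (cnt s x : Int)
      rw [if_neg h]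
      omega

lemma bisect_eq (s : List Int) (hs : s.Pairwise (· < ·)) (x : Int)
    (lo hi : Int) (h0 : 0 ≤ lo) (hlen : hi ≤ (s.length : Int))
    (hlo : lo ≤ (cnt s x : Int)) (hhi : (cnt s x : Int) ≤ hi) :
    bisectLeftLoop s x lo hi = (cnt s x : Int) :=
  bisectFuel_eq s hs x (hi - lo).toNat lo hi le_rfl h0 hlen hlo hhi

lemma mem_iff_cnt (s : List Int) (hs : s.Pairwise (· < ·)) (x : Int) :
    x ∈ s ↔ s[cnt s x]? = some x := by
  constructor
  · intro hx
    rcases List.getElem_of_mem hx with ⟨j, hj, hsx⟩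
    have h1 : ¬ j < cnt s x := by
      intro hc
      have := (sorted_getElem_lt_iff s hs x j hj).mpr hc
      rw [hsx] at this
      exact lt_irrefl x this
    have h2 : j ≤ cnt s x := by
      rcases Nat.eq_zero_or_pos j with h0 | hpos
      · omega
      · have hlt : s[j - 1] < x := by
          have := (List.pairwise_iff_getElem.mp hs) (j - 1) j (by omega) hj (by omega)
          rw [hsx] at this
          exact this
        have := (sorted_getElem_lt_iff s hs x (j - 1) (by omega)).mp hlt
        omega
    rw [show cnt s x = j by omega, List.getElem?_eq_getElem hj, hsx]
  · intro h
    exact List.mem_of_getElem? h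

lemma erase_eq_eraseIdx_cnt (s : List Int) (hs : s.Pairwise (· < ·)) (x : Int)
    (h : s[cnt s x]? = some x) : s.erase x = s.eraseIdx (cnt s x) := by
  have hlt : cnt s x < s.length := by
    by_contra hc
    rw [List.getElem?_eq_none (by omega)] at h
    simp at h
  have hx : s[cnt s x] = x := by
    rw [List.getElem?_eq_getElem hlt] at h
    exact Option.some.inj h
  have hidx : List.idxOf? x s = some (cnt s x) := by
    rw [List.idxOf?_eq_some_iff]
    refine ⟨hlt, hx, ?_⟩
    intro j hj
    have := (sorted_getElem_lt_iff s hs x j (by omega)).mpr hj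
    omega
  rw [List.erase_eq_eraseIdx, hidx]

lemma mem_take_lt (s : List Int) (hs : s.Pairwise (· < ·)) (x : Int) :
    ∀ y ∈ s.take (cnt s x), y < x := by
  intro y hy
  rcases List.mem_iff_getElem.mp hy with ⟨i, hi, hiy⟩
  have hlen : (s.take (cnt s x)).length = min (cnt s x) s.length := by simp
  have hilen : i < s.length := by omega
  have hic : i < cnt s x := by omega
  rw [List.getElem_take] at hiy
  rw [← hiy]
  exact (sorted_getElem_lt_iff s hs x i hilen).mpr hic

lemma mem_drop_gt (s : List Int) (hs : s.Pairwise (· < ·)) (x : Int) (hx : x ∉ s) :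
    ∀ y ∈ s.drop (cnt s x), x < y := by
  intro y hy
  rcases List.mem_iff_getElem.mp hy with ⟨i, hi, hiy⟩
  have hlen : (s.drop (cnt s x)).length = s.length - cnt s x := by simp
  rw [List.getElem_drop] at hiy
  have hmem : y ∈ s := by rw [← hiy]; exact List.getElem_mem _
  have hge : ¬ s[cnt s x + i] < x := by
    intro hlt
    have := (sorted_getElem_lt_iff s hs x (cnt s x + i) (by omega)).mp hlt
    omega
  rw [← hiy]
  refine lt_of_le_of_ne (not_lt.mp hge) ?_
  intro he
  exact hx (he ▸ List.getElem_mem _)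

lemma pairwise_insert_cnt (s : List Int) (hs : s.Pairwise (· < ·)) (x : Int) (hx : x ∉ s) :
    (s.take (cnt s x) ++ x :: s.drop (cnt s x)).Pairwise (· < ·) := by
  refine List.pairwise_append.mpr ⟨List.Pairwise.sublist (List.take_sublist _ _) hs, ?_, ?_⟩
  · exact List.pairwise_cons.mpr ⟨mem_drop_gt s hs x hx, List.Pairwise.sublist (List.drop_sublist _ _) hs⟩
  · intro a ha b hb
    have ha' := mem_take_lt s hs x a ha
    rcases List.mem_cons.mp hb with rfl | hb'
    · exact ha'
    · exact lt_trans ha' (mem_drop_gt s hs x hx b hb')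

lemma insert_eq_take_drop (xs : List Int) (c : Nat) (h : c ≤ xs.length) (v : Int) :
    PySem.List.insert xs (c : Int) v = xs.take c ++ v :: xs.drop c := by
  simp only [PySem.List.insert, PySem.List.sliceIndices]
  rw [if_neg (show ¬ ((c : Int) < 0) by omega), if_neg (show ¬ ((1 : Int) < 0) by omega)]
  have hc : (min (c : Int) (xs.length : Int)).toNat = c := by omega
  rw [hc]

lemma step_eq (b : List Int) (l s ans : List Int)
    (hp : l.Perm s) (hs : s.Pairwise (· < ·)) :
    (stepA (l, ans) b).2 = (stepB (s, ans) b).2 ∧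
    (stepA (l, ans) b).1.Perm (stepB (s, ans) b).1 ∧
    (stepB (s, ans) b).1.Pairwise (· < ·) := by
  have hcle : cnt s ((PySem.List.pyGet? b 1).getD 0) ≤ s.length := cnt_le_length s _
  simp only [stepA, stepB]
  set op := (PySem.List.pyGet? b 0).getD 0 with hopdef
  set x := (PySem.List.pyGet? b 1).getD 0 with hxdef
  have hpos : bisectLeftLoop s x 0 (s.length : Int) = (cnt s x : Int) :=
    bisect_eq s hs x 0 (s.length : Int) (by omega) (by omega) (by omega) (by omega)
  rw [hpos]
  by_cases hop1 : op = 1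
  · rw [if_pos hop1, if_pos hop1]
    by_cases hmem : x ∈ l
    · have hmem_s : x ∈ s := hp.mem_iff.mp hmem
      have hget := (mem_iff_cnt s hs x).mp hmem_s
      have hclt : cnt s x < s.length := by
        by_contra hc
        rw [List.getElem?_eq_none (by omega)] at hget
        simp at hget
      have hsx : s[cnt s x] = x := by
        rw [List.getElem?_eq_getElem hclt] at hget
        exact Option.some.inj hget
      have hcond : ((cnt s x : Int) < (s.length : Int) ∧
          (PySem.List.pyGet? s (cnt s x : Int)).getD 0 = x) := by
        refine ⟨by omega, ?_⟩
        rw [PySem.List.pyGet?_natCast, List.getElem?_eq_getElem hclt]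
        simpa using hsx
      rw [if_pos hmem, if_pos hcond]
      rw [PySem.List.remove?_eq_some_erase l x hmem]
      rw [PySem.List.pop?_natCast s (cnt s x) hclt]
      refine ⟨rfl, ?_, ?_⟩
      · show (l.erase x).Perm (s.eraseIdx (cnt s x))
        rw [← erase_eq_eraseIdx_cnt s hs x hget]
        exact hp.erase x
      · show (s.eraseIdx (cnt s x)).Pairwise (· < ·)
        exact List.Pairwise.sublist (List.eraseIdx_sublist s (cnt s x)) hs
    · have hmem_s : x ∉ s := fun h => hmem (hp.mem_iff.mpr h)
      have hcond : ¬ ((cnt s x : Int) < (s.length : Int) ∧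
          (PySem.List.pyGet? s (cnt s x : Int)).getD 0 = x) := by
        rintro ⟨h1, h2⟩
        have hclt : cnt s x < s.length := by omega
        rw [PySem.List.pyGet?_natCast, List.getElem?_eq_getElem hclt] at h2
        simp only [Option.getD_some] at h2
        exact hmem_s (h2 ▸ List.getElem_mem _)
      rw [if_neg hmem, if_neg hcond]
      rw [insert_eq_take_drop s (cnt s x) hcle x]
      refine ⟨rfl, ?_, pairwise_insert_cnt s hs x hmem_s⟩
      show (l ++ [x]).Perm (s.take (cnt s x) ++ x :: s.drop (cnt s x))
      have hperm : (x :: s).Perm (s.take (cnt s x) ++ x :: s.drop (cnt s x)) := by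
        conv_lhs => rw [← List.take_append_drop (cnt s x) s]
        exact List.perm_middle.symm
      exact ((List.perm_append_singleton x l).trans (hp.cons x)).trans hperm
  · rw [if_neg hop1, if_neg hop1]
    have hsort : PySem.List.sorted l (fun x => x) = s :=
      PySem.List.sorted_eq_of_perm_of_pairwise_lt l s (fun x => x) hp.symm hs
    rw [hsort]
    have hceil : ceiling s 0 ((s.length : Int) - 1) x = (cnt s x : Int) :=
      ceiling_eq s hs x 0 ((s.length : Int) - 1) (by omega) (by omega) (by omega) (by omega)
    rw [hceil]
    by_cases hnil : s = []
    · subst hnil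
      have hc0 : cnt ([] : List Int) x = 0 := rfl
      rw [hc0]
      refine ⟨?_, ?_, ?_⟩ <;> simp
    · have hm1 : 0 < s.length := List.length_pos_iff.mpr hnil
      by_cases hc0 : cnt s x = 0
      · have c1 : ¬ ((cnt s x : Int) ≥ (s.length : Int) ∧ (cnt s x : Int) - 1 < 0) := by omega
        have c2 : ((cnt s x : Int) < (s.length : Int) ∧ (cnt s x : Int) - 1 < 0) := by omega
        have c3 : ¬ ((cnt s x : Int) = (s.length : Int)) := by omega
        have c4 : ((cnt s x : Int) = 0) := by omega
        rw [if_neg c1, if_pos c2, if_neg hnil, if_neg c3, if_pos c4, c4]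
        exact ⟨rfl, List.Perm.refl s, hs⟩
      · by_cases hcm : cnt s x = s.length
        · have c1 : ¬ ((cnt s x : Int) ≥ (s.length : Int) ∧ (cnt s x : Int) - 1 < 0) := by omega
          have c2 : ¬ ((cnt s x : Int) < (s.length : Int) ∧ (cnt s x : Int) - 1 < 0) := by omega
          have c3 : ((cnt s x : Int) ≥ (s.length : Int) ∧ (cnt s x : Int) - 1 > -1) := by omega
          have c4 : ((cnt s x : Int) = (s.length : Int)) := by omega
          have e : ((cnt s x : Int) - 1) = ((s.length - 1 : Nat) : Int) := by omega
          rw [if_neg c1, if_neg c2, if_pos c3, if_neg hnil, if_pos c4,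
            e, PySem.List.pyGet?_natCast, PySem.List.pyGet?_neg_one, List.getLast?_eq_getElem?]
          exact ⟨rfl, List.Perm.refl s, hs⟩
        · have c1 : ¬ ((cnt s x : Int) ≥ (s.length : Int) ∧ (cnt s x : Int) - 1 < 0) := by omega
          have c2 : ¬ ((cnt s x : Int) < (s.length : Int) ∧ (cnt s x : Int) - 1 < 0) := by omega
          have c3 : ¬ ((cnt s x : Int) ≥ (s.length : Int) ∧ (cnt s x : Int) - 1 > -1) := by omega
          have c4 : ¬ ((cnt s x : Int) = (s.length : Int)) := by omega
          have c5 : ¬ ((cnt s x : Int) = 0) := by omega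
          rw [if_neg c1, if_neg c2, if_neg c3, if_neg hnil, if_neg c4, if_neg c5]
          by_cases hcmp : (PySem.List.pyGet? s (cnt s x : Int)).getD 0 - x <
              x - (PySem.List.pyGet? s ((cnt s x : Int) - 1)).getD 0
          · rw [if_pos hcmp]
            exact ⟨rfl, List.Perm.refl s, hs⟩
          · rw [if_neg hcmp]
            exact ⟨rfl, List.Perm.refl s, hs⟩

lemma fold_eq (B : List (List Int)) :
    ∀ (l s ans : List Int), l.Perm s → s.Pairwise (· < ·) →
      (B.foldl stepA (l, ans)).2 = (B.foldl stepB (s, ans)).2 := by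
  induction B with
  | nil => intro l s ans hp hs; rfl
  | cons b B ih =>
    intro l s ans hp hs
    rw [List.foldl_cons, List.foldl_cons]
    have h := step_eq b l s ans hp hs
    have e : stepA (l, ans) b = ((stepA (l, ans) b).1, (stepB (s, ans) b).2) := by
      rw [← h.1]
    rw [e]
    exact ih _ _ _ h.2.1 h.2.2

lemma init_eq (A : String) :
    (PySem.List.pyRange 0 (PySem.Str.len A)).foldl
      (fun acc i => if (PySem.Str.pyGet? A i).getD ' ' = '1' then acc ++ [i + 1] else acc) [] =
    ((PySem.List.enumerate A.toList).filter (fun p => p.2 == '1')).map (fun p => p.1 + 1) := by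
  rw [PySem.List.foldl_append_ite (p := fun i : Int => (PySem.Str.pyGet? A i).getD ' ' = '1')
    (f := fun i : Int => i + 1)]
  rw [PySem.List.enumerate_eq_map_pyRange A.toList ' ', List.filter_map, List.map_map]
  rw [List.nil_append]
  have hlen : PySem.Str.len A = PySem.List.len A.toList := rfl
  rw [hlen]
  have hfun : ((fun p : Int × Char => p.1 + 1) ∘ (fun j => (j, PySem.List.pyGetD A.toList j ' ')))
      = fun i : Int => i + 1 := rfl
  rw [hfun]
  have hpq : ∀ i ∈ PySem.List.pyRange 0 (PySem.List.len A.toList),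
      (decide ((PySem.Str.pyGet? A i).getD ' ' = '1'))
        = ((fun p : Int × Char => p.2 == '1') ∘ fun j => (j, PySem.List.pyGetD A.toList j ' ')) i := by
    intro i hi
    have h1 : PySem.Str.pyGet? A i = PySem.List.pyGet? A.toList i := PySem.Str.pyGet?_eq A i
    show decide ((PySem.Str.pyGet? A i).getD ' ' = '1') = (PySem.List.pyGetD A.toList i ' ' == '1')
    have h2 : PySem.List.pyGetD A.toList i ' ' = (PySem.List.pyGet? A.toList i).getD ' ' := rfl
    rw [h1, h2]
    exact Eq.symm (Bool.beq_eq_decide_eq _ '1')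
  rw [List.filter_congr hpq]

lemma init_pairwise (A : String) :
    (((PySem.List.enumerate A.toList).filter (fun p => p.2 == '1')).map (fun p => p.1 + 1)).Pairwise (· < ·) := by
  have h1 := PySem.List.pairwise_lt_enumerate A.toList 0
  have h2 := h1.filter (fun p => p.2 == '1')
  exact List.Pairwise.map _ (fun a b hab => by omega) h2

-- ===== VERDICT (by name: the statement is the Claim_ definition above) =====
theorem solve_spec : Claim_equal_solve := by
  intro A B _hdom _hpre
  unfold Spec_solve solve solve_alt
  rw [init_eq A]
  exact fold_eq B _ _ [] (List.Perm.refl _) (init_pairwise A)
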